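-- pv_equiv track=rewrite | github.com/quasientio/scriptchat | scripts/update_model_defaults.py | generate_module
-- ===== SOURCE A (Python) =====
-- def generate_module(models: dict[str, int]) -> str:
--     """Generate the model_defaults.py module content."""
--
--     # Group models by provider (best effort based on naming)
--     providers = {
--         "OpenAI": [],
--         "Anthropic": [],
--         "DeepSeek": [],
--         "Mistral": [],
--         "Gemini": [],
--         "Qwen": [],
--         "Llama": [],
--         "Other": [],
--     }
--
--     for model, context in sorted(models.items()):
--         model_lower = model.lower()
--         if model_lower.startswith(("gpt-", "o1", "o3", "o4")):
--             providers["OpenAI"].append((model, context))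
--         elif model_lower.startswith("claude"):
--             providers["Anthropic"].append((model, context))
--         elif model_lower.startswith("deepseek"):
--             providers["DeepSeek"].append((model, context))
--         elif model_lower.startswith("mistral"):
--             providers["Mistral"].append((model, context))
--         elif model_lower.startswith("gemini") or model_lower.startswith("gemma"):
--             providers["Gemini"].append((model, context))
--         elif model_lower.startswith("qwen") or model_lower.startswith("qwq"):
--             providers["Qwen"].append((model, context))
--         elif model_lower.startswith("llama"):
--             providers["Llama"].append((model, context))
--         else:
--             providers["Other"].append((model, context))
--
--     lines = [
--         '"""Default context window limits for well-known LLM models.',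
--         "",
--         "This module provides built-in context limits for common models so that",
--         "context usage % can be displayed in the status bar without requiring",
--         "explicit configuration.",
--         "",
--         "Data sourced from: https://github.com/taylorwilsdon/llm-context-limits",
--         "",
--         "To update these defaults, run:",
--         "    python scripts/update_model_defaults.py",
--         "",
--         "Precedence: User config (contexts in config.toml) > these defaults",
--         '"""',
--         "",
--         "# Model name -> context window size in tokens",
--         "# Use lowercase keys for case-insensitive matching",
--         "MODEL_CONTEXT_LIMITS: dict[str, int] = {",
--     ]
--
--     for provider, model_list in providers.items():
--         if not model_list:
--             continue
--         lines.append(f"    # {provider} models")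
--         for model, context in sorted(model_list):
--             lines.append(f'    "{model}": {context},')
--         lines.append("")
--
--     # Remove trailing empty line inside dict
--     if lines[-1] == "":
--         lines.pop()
--
--     lines.append("}")
--     lines.append("")
--     lines.append("")
--     lines.append("def get_default_context_limit(model_name: str) -> int | None:")
--     lines.append('    """Get the default context limit for a model.')
--     lines.append("")
--     lines.append("    Uses fuzzy matching: first tries exact match, then prefix match.")
--     lines.append("    For example, 'gpt-4o-2024-08-06' will match 'gpt-4o'.")
--     lines.append("")
--     lines.append("    Args:")
--     lines.append("        model_name: The model name to look up")
--     lines.append("")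
--     lines.append("    Returns:")
--     lines.append("        Context limit in tokens, or None if unknown")
--     lines.append('    """')
--     lines.append("    name_lower = model_name.lower()")
--     lines.append("")
--     lines.append("    # Try exact match first")
--     lines.append("    if name_lower in MODEL_CONTEXT_LIMITS:")
--     lines.append("        return MODEL_CONTEXT_LIMITS[name_lower]")
--     lines.append("")
--     lines.append("    # Try prefix match (longest match wins)")
--     lines.append("    best_match = None")
--     lines.append("    best_length = 0")
--     lines.append("")
--     lines.append("    for known_model, limit in MODEL_CONTEXT_LIMITS.items():")
--     lines.append("        if name_lower.startswith(known_model) and len(known_model) > best_length:")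
--     lines.append("            best_match = limit")
--     lines.append("            best_length = len(known_model)")
--     lines.append("")
--     lines.append("    return best_match")
--     lines.append("")
--
--     return "\n".join(lines)
-- ===== SOURCE B (Python) =====
-- _HEADER = '''"""Default context window limits for well-known LLM models.
--
-- This module provides built-in context limits for common models so that
-- context usage % can be displayed in the status bar without requiring
-- explicit configuration.
--
-- Data sourced from: https://github.com/taylorwilsdon/llm-context-limits
--
-- To update these defaults, run:
--     python scripts/update_model_defaults.py
--
-- Precedence: User config (contexts in config.toml) > these defaults
-- """
--
-- # Model name -> context window size in tokens
-- # Use lowercase keys for case-insensitive matching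
-- MODEL_CONTEXT_LIMITS: dict[str, int] = {'''
--
-- _FOOTER = '''}
--
--
-- def get_default_context_limit(model_name: str) -> int | None:
--     """Get the default context limit for a model.
--
--     Uses fuzzy matching: first tries exact match, then prefix match.
--     For example, 'gpt-4o-2024-08-06' will match 'gpt-4o'.
--
--     Args:
--         model_name: The model name to look up
--
--     Returns:
--         Context limit in tokens, or None if unknown
--     """
--     name_lower = model_name.lower()
--
--     # Try exact match first
--     if name_lower in MODEL_CONTEXT_LIMITS:
--         return MODEL_CONTEXT_LIMITS[name_lower]
--
--     # Try prefix match (longest match wins)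
--     best_match = None
--     best_length = 0
--
--     for known_model, limit in MODEL_CONTEXT_LIMITS.items():
--         if name_lower.startswith(known_model) and len(known_model) > best_length:
--             best_match = limit
--             best_length = len(known_model)
--
--     return best_match
-- '''
--
-- _RULES = [
--     ("OpenAI", ("gpt-", "o1", "o3", "o4")),
--     ("Anthropic", ("claude",)),
--     ("DeepSeek", ("deepseek",)),
--     ("Mistral", ("mistral",)),
--     ("Gemini", ("gemini", "gemma")),
--     ("Qwen", ("qwen", "qwq")),
--     ("Llama", ("llama",)),
-- ]
--
--
-- def _classify(model: str) -> str:
--     model_lower = model.lower()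
--     return next((p for p, prefixes in _RULES if model_lower.startswith(prefixes)), "Other")
--
--
-- def generate_module(models: dict[str, int]) -> str:
--     """Generate the model_defaults.py module content."""
--     items = sorted(models.items())
--     blocks = []
--     for provider in [p for p, _ in _RULES] + ["Other"]:
--         group = sorted((m, c) for m, c in items if _classify(m) == provider)
--         if group:
--             block_lines = [f"    # {provider} models"]
--             block_lines += [f'    "{m}": {c},' for m, c in group]
--             blocks.append("\n".join(block_lines))
--     body = ("\n" + "\n\n".join(blocks)) if blocks else ""
--     return _HEADER + body + "\n" + _FOOTER
-- ===== Notes on version B (the rewrite author's own statement) =====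
-- stated objective: idiomatic
-- what changed: B replaces A's eight-way if/elif cascade and mutated dict-of-lists with an ordered (provider, prefixes) rule table classified by a first-match lookup, builds each provider block by filtering the sorted items per provider, and assembles the output from header/footer string constants joined with the blocks instead of growing a line list and popping a trailing blank.
import Mathlib
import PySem

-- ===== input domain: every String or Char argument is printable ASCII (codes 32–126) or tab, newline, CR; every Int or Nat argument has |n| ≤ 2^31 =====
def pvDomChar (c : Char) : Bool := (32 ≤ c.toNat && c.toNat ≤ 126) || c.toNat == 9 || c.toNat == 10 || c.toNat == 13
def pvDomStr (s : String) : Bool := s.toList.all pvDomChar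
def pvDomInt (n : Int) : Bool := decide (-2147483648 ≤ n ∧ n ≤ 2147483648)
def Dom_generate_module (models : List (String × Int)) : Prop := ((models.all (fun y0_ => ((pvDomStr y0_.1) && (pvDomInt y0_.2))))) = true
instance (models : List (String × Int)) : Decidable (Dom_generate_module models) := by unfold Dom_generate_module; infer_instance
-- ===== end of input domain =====

-- B replaces A's eight-way if/elif cascade by an ordered rule table (provider, prefixes) with a first-match
-- lookup, builds each provider block as one string and joins blocks, instead of mutating a dict of lists and
-- a growing line list; objective: idiomatic. Equivalence of the RETURN value is proved on the whole domain.

-- ===== PORT A =====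
def pvHeaderLines : List String := [
  "\"\"\"Default context window limits for well-known LLM models.",
  "",
  "This module provides built-in context limits for common models so that",
  "context usage % can be displayed in the status bar without requiring",
  "explicit configuration.",
  "",
  "Data sourced from: https://github.com/taylorwilsdon/llm-context-limits",
  "",
  "To update these defaults, run:",
  "    python scripts/update_model_defaults.py",
  "",
  "Precedence: User config (contexts in config.toml) > these defaults",
  "\"\"\"",
  "",
  "# Model name -> context window size in tokens",
  "# Use lowercase keys for case-insensitive matching",
  "MODEL_CONTEXT_LIMITS: dict[str, int] = {"]

def generate_module (models : List (String × Int)) : String :=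
  let providers0 : PySem.Dict String (List (String × Int)) :=
    PySem.Dict.ofList [("OpenAI", []), ("Anthropic", []), ("DeepSeek", []), ("Mistral", []),
                       ("Gemini", []), ("Qwen", []), ("Llama", []), ("Other", [])]
  let providers := (PySem.List.sorted2 (PySem.Dict.ofList models).items Prod.fst Prod.snd).foldl
    (fun d mc =>
      let ml := PySem.Str.lower mc.1
      if PySem.Str.startswith ml "gpt-" || PySem.Str.startswith ml "o1" ||
         PySem.Str.startswith ml "o3" || PySem.Str.startswith ml "o4" then
        d.modify "OpenAI" [] (· ++ [mc])
      else if PySem.Str.startswith ml "claude" then d.modify "Anthropic" [] (· ++ [mc])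
      else if PySem.Str.startswith ml "deepseek" then d.modify "DeepSeek" [] (· ++ [mc])
      else if PySem.Str.startswith ml "mistral" then d.modify "Mistral" [] (· ++ [mc])
      else if PySem.Str.startswith ml "gemini" || PySem.Str.startswith ml "gemma" then
        d.modify "Gemini" [] (· ++ [mc])
      else if PySem.Str.startswith ml "qwen" || PySem.Str.startswith ml "qwq" then
        d.modify "Qwen" [] (· ++ [mc])
      else if PySem.Str.startswith ml "llama" then d.modify "Llama" [] (· ++ [mc])
      else d.modify "Other" [] (· ++ [mc])) providers0
  let lines := pvHeaderLines
  let lines := providers.items.foldl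
    (fun lines pm =>
      if pm.2 = [] then lines
      else
        let lines := lines ++ ["    # " ++ pm.1 ++ " models"]
        let lines := (PySem.List.sorted2 pm.2 Prod.fst Prod.snd).foldl
          (fun lines mc => lines ++ ["    \"" ++ mc.1 ++ "\": " ++ PySem.Int.toStr mc.2 ++ ","]) lines
        lines ++ [""]) lines
  -- lines.pop() on a list that is provably nonempty here: pop? never returns none on this branch
  let lines := if PySem.List.pyGet? lines (-1) = some "" then
      (match PySem.List.pop? lines (-1) with | some r => r.2 | none => lines)
    else lines
  let lines := lines ++ ["}"]
  let lines := lines ++ [""]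
  let lines := lines ++ [""]
  let lines := lines ++ ["def get_default_context_limit(model_name: str) -> int | None:"]
  let lines := lines ++ ["    \"\"\"Get the default context limit for a model."]
  let lines := lines ++ [""]
  let lines := lines ++ ["    Uses fuzzy matching: first tries exact match, then prefix match."]
  let lines := lines ++ ["    For example, 'gpt-4o-2024-08-06' will match 'gpt-4o'."]
  let lines := lines ++ [""]
  let lines := lines ++ ["    Args:"]
  let lines := lines ++ ["        model_name: The model name to look up"]
  let lines := lines ++ [""]
  let lines := lines ++ ["    Returns:"]
  let lines := lines ++ ["        Context limit in tokens, or None if unknown"]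
  let lines := lines ++ ["    \"\"\""]
  let lines := lines ++ ["    name_lower = model_name.lower()"]
  let lines := lines ++ [""]
  let lines := lines ++ ["    # Try exact match first"]
  let lines := lines ++ ["    if name_lower in MODEL_CONTEXT_LIMITS:"]
  let lines := lines ++ ["        return MODEL_CONTEXT_LIMITS[name_lower]"]
  let lines := lines ++ [""]
  let lines := lines ++ ["    # Try prefix match (longest match wins)"]
  let lines := lines ++ ["    best_match = None"]
  let lines := lines ++ ["    best_length = 0"]
  let lines := lines ++ [""]
  let lines := lines ++ ["    for known_model, limit in MODEL_CONTEXT_LIMITS.items():"]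
  let lines := lines ++ ["        if name_lower.startswith(known_model) and len(known_model) > best_length:"]
  let lines := lines ++ ["            best_match = limit"]
  let lines := lines ++ ["            best_length = len(known_model)"]
  let lines := lines ++ [""]
  let lines := lines ++ ["    return best_match"]
  let lines := lines ++ [""]
  PySem.Str.join "\n" lines

-- ===== PORT B =====
def pvHeaderStr : String := "\"\"\"Default context window limits for well-known LLM models.\n\nThis module provides built-in context limits for common models so that\ncontext usage % can be displayed in the status bar without requiring\nexplicit configuration.\n\nData sourced from: https://github.com/taylorwilsdon/llm-context-limits\n\nTo update these defaults, run:\n    python scripts/update_model_defaults.py\n\nPrecedence: User config (contexts in config.toml) > these defaults\n\"\"\"\n\n# Model name -> context window size in tokens\n# Use lowercase keys for case-insensitive matching\nMODEL_CONTEXT_LIMITS: dict[str, int] = {"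

def pvFooterStr : String := "}\n\n\ndef get_default_context_limit(model_name: str) -> int | None:\n    \"\"\"Get the default context limit for a model.\n\n    Uses fuzzy matching: first tries exact match, then prefix match.\n    For example, 'gpt-4o-2024-08-06' will match 'gpt-4o'.\n\n    Args:\n        model_name: The model name to look up\n\n    Returns:\n        Context limit in tokens, or None if unknown\n    \"\"\"\n    name_lower = model_name.lower()\n\n    # Try exact match first\n    if name_lower in MODEL_CONTEXT_LIMITS:\n        return MODEL_CONTEXT_LIMITS[name_lower]\n\n    # Try prefix match (longest match wins)\n    best_match = None\n    best_length = 0\n\n    for known_model, limit in MODEL_CONTEXT_LIMITS.items():\n        if name_lower.startswith(known_model) and len(known_model) > best_length:\n            best_match = limit\n            best_length = len(known_model)\n\n    return best_match\n"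

def pvRules : List (String × List String) :=
  [("OpenAI", ["gpt-", "o1", "o3", "o4"]),
   ("Anthropic", ["claude"]),
   ("DeepSeek", ["deepseek"]),
   ("Mistral", ["mistral"]),
   ("Gemini", ["gemini", "gemma"]),
   ("Qwen", ["qwen", "qwq"]),
   ("Llama", ["llama"])]

def pvClassify (model : String) : String :=
  let ml := PySem.Str.lower model
  (((pvRules.find? (fun r => r.2.any (fun p => PySem.Str.startswith ml p))).map Prod.fst)).getD "Other"

def generate_module_alt (models : List (String × Int)) : String :=
  let items := PySem.List.sorted2 (PySem.Dict.ofList models).items Prod.fst Prod.snd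
  let blocks := (pvRules.map Prod.fst ++ ["Other"]).filterMap (fun provider =>
    let group := PySem.List.sorted2 (items.filter (fun mc => pvClassify mc.1 == provider))
      Prod.fst Prod.snd
    if group = [] then none
    else some (PySem.Str.join "\n" (("    # " ++ provider ++ " models") ::
      group.map (fun mc => "    \"" ++ mc.1 ++ "\": " ++ PySem.Int.toStr mc.2 ++ ","))))
  let body := if blocks = [] then "" else "\n" ++ PySem.Str.join "\n\n" blocks
  pvHeaderStr ++ body ++ "\n" ++ pvFooterStr

-- ===== PRECONDITION & SPEC =====
def Spec_generate_module (models : List (String × Int)) (out : String) : Prop := out = generate_module_alt models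
instance (models : List (String × Int)) (out : String) : Decidable (Spec_generate_module models out) := by unfold Spec_generate_module; infer_instance

-- ===== CLAIM (what is proved, stated in full; the proofs are below) =====
def Claim_equal_generate_module : Prop := ∀ (models : List (String × Int)), Dom_generate_module models → Spec_generate_module models (generate_module models)

-- ===== LEMMAS AND PROOFS =====

def pvFooterLines : List String := [
  "}",
  "",
  "",
  "def get_default_context_limit(model_name: str) -> int | None:",
  "    \"\"\"Get the default context limit for a model.",
  "",
  "    Uses fuzzy matching: first tries exact match, then prefix match.",
  "    For example, 'gpt-4o-2024-08-06' will match 'gpt-4o'.",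
  "",
  "    Args:",
  "        model_name: The model name to look up",
  "",
  "    Returns:",
  "        Context limit in tokens, or None if unknown",
  "    \"\"\"",
  "    name_lower = model_name.lower()",
  "",
  "    # Try exact match first",
  "    if name_lower in MODEL_CONTEXT_LIMITS:",
  "        return MODEL_CONTEXT_LIMITS[name_lower]",
  "",
  "    # Try prefix match (longest match wins)",
  "    best_match = None",
  "    best_length = 0",
  "",
  "    for known_model, limit in MODEL_CONTEXT_LIMITS.items():",
  "        if name_lower.startswith(known_model) and len(known_model) > best_length:",
  "            best_match = limit",
  "            best_length = len(known_model)",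
  "",
  "    return best_match",
  ""]


def pvKey8 : List String := ["OpenAI","Anthropic","DeepSeek","Mistral","Gemini","Qwen","Llama","Other"]

def pvEntry (mc : String × Int) : String := "    \"" ++ mc.1 ++ "\": " ++ PySem.Int.toStr mc.2 ++ ","

def pvHdr (p : String) : String := "    # " ++ p ++ " models"

def pvBlockLines (pg : String × List (String × Int)) : List String :=
  pvHdr pg.1 :: (PySem.List.sorted2 pg.2 Prod.fst Prod.snd).map pvEntry

-- A's branch cascade assigns each model to exactly the provider that B's first-match rule table picks
theorem pvStepA_eq (d : PySem.Dict String (List (String × Int))) (mc : String × Int) :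
    (let ml := PySem.Str.lower mc.1
      if PySem.Str.startswith ml "gpt-" || PySem.Str.startswith ml "o1" ||
         PySem.Str.startswith ml "o3" || PySem.Str.startswith ml "o4" then
        d.modify "OpenAI" [] (· ++ [mc])
      else if PySem.Str.startswith ml "claude" then d.modify "Anthropic" [] (· ++ [mc])
      else if PySem.Str.startswith ml "deepseek" then d.modify "DeepSeek" [] (· ++ [mc])
      else if PySem.Str.startswith ml "mistral" then d.modify "Mistral" [] (· ++ [mc])
      else if PySem.Str.startswith ml "gemini" || PySem.Str.startswith ml "gemma" then
        d.modify "Gemini" [] (· ++ [mc])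
      else if PySem.Str.startswith ml "qwen" || PySem.Str.startswith ml "qwq" then
        d.modify "Qwen" [] (· ++ [mc])
      else if PySem.Str.startswith ml "llama" then d.modify "Llama" [] (· ++ [mc])
      else d.modify "Other" [] (· ++ [mc]))
    = d.modify (pvClassify mc.1) [] (· ++ [mc]) := by
  unfold pvClassify pvRules
  simp only [List.find?, List.any_cons, List.any_nil, Bool.or_false, Bool.or_assoc]
  (repeat' split) <;> simp_all

theorem pvFindFstMem {α : Type} {ks : List String} (p : String × α → Bool) (l : List (String × α))
    (dflt : String) (h : dflt ∈ ks) (h2 : ∀ r ∈ l, r.1 ∈ ks) :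
    ((l.find? p).map Prod.fst).getD dflt ∈ ks := by
  cases hf : l.find? p with
  | none => simpa
  | some r => simpa using h2 r (List.mem_of_find?_eq_some hf)

theorem pvClassify_mem (m : String) : pvClassify m ∈ pvKey8 := by
  unfold pvClassify
  exact pvFindFstMem _ _ _ (by decide) (by decide)

def pvProviders0 : PySem.Dict String (List (String × Int)) :=
  PySem.Dict.ofList [("OpenAI", []), ("Anthropic", []), ("DeepSeek", []), ("Mistral", []),
                     ("Gemini", []), ("Qwen", []), ("Llama", []), ("Other", [])]

theorem pvGroup_fold (l : List (String × Int)) (d : PySem.Dict String (List (String × Int))) (c : String) :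
    (l.foldl (fun d p => d.modify (pvClassify p.1) [] (· ++ [p])) d).getD c []
      = d.getD c [] ++ l.filter (fun p => pvClassify p.1 == c) := by
  induction l generalizing d with
  | nil => simp
  | cons p l ih =>
    simp only [List.foldl_cons, List.filter_cons, ih, PySem.Dict.getD_modify]
    by_cases h : c = pvClassify p.1
    · simp [h]
    · simp [h, Ne.symm h]

theorem pvSetUpdate_of_mem (l : List String) (s : List String) (h : ∀ x ∈ l, x ∈ s) :
    PySem.Set.update s l = s := by
  induction l generalizing s with
  | nil => rfl
  | cons x l ih =>
    have hx : PySem.Set.add s x = s := by simp [PySem.Set.add, h x (by simp)]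
    have : PySem.Set.update s (x :: l) = PySem.Set.update (PySem.Set.add s x) l := rfl
    rw [this, hx]
    exact ih s (fun y hy => h y (by simp [hy]))

theorem pvItems_final (l : List (String × Int)) :
    (l.foldl (fun d p => d.modify (pvClassify p.1) [] (· ++ [p])) pvProviders0).items
      = pvKey8.map (fun k => (k, l.filter (fun p => pvClassify p.1 == k))) := by
  have hkeys : (l.foldl (fun d p => d.modify (pvClassify p.1) [] (· ++ [p])) pvProviders0).keys = pvKey8 := by
    have := PySem.Dict.keys_foldl_modify_key l (fun p => pvClassify p.1) ([] : List (String × Int))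
      (fun _ p v => v ++ [p]) pvProviders0
    rw [this]
    have h0 : pvProviders0.keys = pvKey8 := by decide
    rw [h0]
    exact pvSetUpdate_of_mem _ _ (by intro x hx; rcases List.mem_map.mp hx with ⟨p, _, rfl⟩; exact pvClassify_mem p.1)
  rw [PySem.Dict.items_eq_map_keys _ (by rw [hkeys]; decide) ([] : List (String × Int)), hkeys]
  apply List.map_congr_left
  intro k hk
  rw [pvGroup_fold]
  have : pvProviders0.getD k [] = [] := by
    fin_cases hk <;> decide
  rw [this, List.nil_append]

def pvStepL (lines : List String) (pm : String × List (String × Int)) : List String :=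
  if pm.2 = [] then lines
  else ((lines ++ [pvHdr pm.1]) ++ (PySem.List.sorted2 pm.2 Prod.fst Prod.snd).map pvEntry) ++ [""]

def pvDelta (pg : String × List (String × Int)) : List String :=
  if pg.2 = [] then [] else pvBlockLines pg ++ [""]

theorem pvFoldBody (gs : List (String × List (String × Int))) (acc : List String) :
    gs.foldl pvStepL acc = acc ++ gs.flatMap pvDelta := by
  induction gs generalizing acc with
  | nil => simp
  | cons pg gs ih =>
    simp only [List.foldl_cons, List.flatMap_cons, ih]
    unfold pvStepL pvDelta pvBlockLines
    by_cases h : pg.2 = [] <;> simp [h]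

def pvBlocks (gs : List (String × List (String × Int))) : List (List String) :=
  gs.filterMap (fun pg => if pg.2 = [] then none else some (pvBlockLines pg))

theorem pvDeltaBlocks (gs : List (String × List (String × Int))) :
    gs.flatMap pvDelta = (pvBlocks gs).flatMap (· ++ [""]) := by
  induction gs with
  | nil => rfl
  | cons pg gs ih =>
    unfold pvBlocks pvDelta at *
    by_cases h : pg.2 = [] <;> simp [h, ih]

theorem pvCharsJoinAppend (sep : List Char) (xs ys : List (List Char)) (hx : xs ≠ []) (hy : ys ≠ []) :
    PySem.Chars.join sep (xs ++ ys) = PySem.Chars.join sep xs ++ sep ++ PySem.Chars.join sep ys := by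
  induction xs with
  | nil => simp at hx
  | cons a xs ih =>
    cases xs with
    | nil =>
      cases ys with
      | nil => simp at hy
      | cons b ys =>
        rw [List.singleton_append, PySem.Chars.join_cons_cons, PySem.Chars.join_singleton]
    | cons a2 xs2 =>
      rw [List.cons_append, List.cons_append, PySem.Chars.join_cons_cons,
          show a2 :: (xs2 ++ ys) = (a2 :: xs2) ++ ys from rfl, ih (by simp),
          PySem.Chars.join_cons_cons]
      simp [List.append_assoc]

theorem pvStrJoinAppend (sep : String) (xs ys : List String) (hx : xs ≠ []) (hy : ys ≠ []) :
    PySem.Str.join sep (xs ++ ys) = PySem.Str.join sep xs ++ sep ++ PySem.Str.join sep ys := by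
  apply String.toList_inj.mp
  simp only [PySem.Str.toList_join, String.toList_append, List.map_append]
  exact pvCharsJoinAppend _ _ _ (by simpa using hx) (by simpa using hy)

theorem pvStrJoinSingleton (sep : String) (x : String) : PySem.Str.join sep [x] = x := by
  apply String.toList_inj.mp
  simp [PySem.Str.toList_join, PySem.Chars.join_singleton]

theorem pvCoreNeNil (b : List String) (bs : List (List String)) (hb : b ≠ []) :
    (((b :: bs).flatMap (· ++ [""])).dropLast) ≠ [] := by
  have h1 : ((b :: bs).flatMap (· ++ [""])).length = b.length + 1 + (bs.flatMap (· ++ [""])).length := by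
    simp [List.flatMap_cons]; omega
  have hb' : 0 < b.length := List.length_pos_of_ne_nil hb
  intro hc
  have h2 := congrArg List.length hc
  rw [List.length_dropLast, h1, List.length_nil] at h2
  omega

theorem pvStrJoinConsCons (sep x y : String) (r : List String) :
    PySem.Str.join sep (x :: y :: r) = x ++ sep ++ PySem.Str.join sep (y :: r) := by
  apply String.toList_inj.mp
  simp only [PySem.Str.toList_join, List.map_cons, String.toList_append,
    PySem.Chars.join_cons_cons]

theorem pvJoinCoreS (b : List String) (bs : List (List String)) (hb : b ≠ [])
    (hbs : ∀ x ∈ bs, x ≠ []) :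
    PySem.Str.join "\n" (((b :: bs).flatMap (· ++ [""])).dropLast)
      = PySem.Str.join "\n\n" ((b :: bs).map (PySem.Str.join "\n")) := by
  induction bs generalizing b with
  | nil =>
    simp only [List.flatMap_cons, List.flatMap_nil, List.append_nil, List.dropLast_concat,
      List.map_cons, List.map_nil]
    rw [pvStrJoinSingleton]
  | cons b2 bs ih =>
    have hcore2 : (((b2 :: bs).flatMap (· ++ [""])).dropLast) ≠ [] :=
      pvCoreNeNil b2 bs (hbs b2 (by simp))
    have hflat : ((b :: b2 :: bs).flatMap (· ++ [""])) = (b ++ [""]) ++ ((b2 :: bs).flatMap (· ++ [""])) := by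
      simp [List.flatMap_cons]
    have hflat2 : ((b2 :: bs).flatMap (· ++ [""])) ≠ [] := by
      intro hc; rw [hc] at hcore2; exact hcore2 rfl
    rw [hflat, List.dropLast_append_of_ne_nil hflat2,
        pvStrJoinAppend _ _ _ (by simp) hcore2,
        pvStrJoinAppend _ _ _ hb (by simp),
        pvStrJoinSingleton,
        ih b2 (hbs b2 (by simp)) (fun x hx => hbs x (by simp [hx]))]
    simp only [List.map_cons]
    rw [pvStrJoinConsCons]
    apply String.toList_inj.mp
    simp [String.toList_append]

set_option maxRecDepth 100000 in
theorem pvEmit (bs : List (List String)) (h : ∀ b ∈ bs, b ≠ []) :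
    PySem.Str.join "\n" ((pvHeaderLines ++ (bs.flatMap (· ++ [""])).dropLast) ++ pvFooterLines)
      = pvHeaderStr ++ (if bs.map (PySem.Str.join "\n") = [] then ""
          else "\n" ++ PySem.Str.join "\n\n" (bs.map (PySem.Str.join "\n"))) ++ "\n" ++ pvFooterStr := by
  have hHF : PySem.Str.join "\n" pvHeaderLines = pvHeaderStr ∧ PySem.Str.join "\n" pvFooterLines = pvFooterStr := by
    constructor <;> rfl
  cases bs with
  | nil =>
    simp only [List.flatMap_nil, List.dropLast_nil, List.append_nil, List.map_nil]
    rw [pvStrJoinAppend _ _ _ (by simp [pvHeaderLines]) (by simp [pvFooterLines]), hHF.1, hHF.2]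
    apply String.toList_inj.mp
    simp [String.toList_append]
  | cons b bs' =>
    have hcore : ((b :: bs').flatMap (· ++ [""])).dropLast ≠ [] := pvCoreNeNil b bs' (h b (by simp))
    rw [if_neg (by simp)]
    rw [pvStrJoinAppend _ _ _ (by simp [pvHeaderLines]) (by simp [pvFooterLines])]
    rw [pvStrJoinAppend _ _ _ (by simp [pvHeaderLines]) hcore]
    rw [hHF.1, hHF.2]
    rw [pvJoinCoreS b bs' (h b (by simp)) (fun x hx => h x (by simp [hx]))]
    apply String.toList_inj.mp
    simp [String.toList_append]

theorem pvFooterAppends (X : List String) :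
    ((((((((((((((((((((((((((((((((X ++ ["}"]) ++ [""]) ++ [""]) ++ ["def get_default_context_limit(model_name: str) -> int | None:"]) ++ ["    \"\"\"Get the default context limit for a model."]) ++ [""]) ++ ["    Uses fuzzy matching: first tries exact match, then prefix match."]) ++ ["    For example, 'gpt-4o-2024-08-06' will match 'gpt-4o'."]) ++ [""]) ++ ["    Args:"]) ++ ["        model_name: The model name to look up"]) ++ [""]) ++ ["    Returns:"]) ++ ["        Context limit in tokens, or None if unknown"]) ++ ["    \"\"\""]) ++ ["    name_lower = model_name.lower()"]) ++ [""]) ++ ["    # Try exact match first"]) ++ ["    if name_lower in MODEL_CONTEXT_LIMITS:"]) ++ ["        return MODEL_CONTEXT_LIMITS[name_lower]"]) ++ [""]) ++ ["    # Try prefix match (longest match wins)"]) ++ ["    best_match = None"]) ++ ["    best_length = 0"]) ++ [""]) ++ ["    for known_model, limit in MODEL_CONTEXT_LIMITS.items():"]) ++ ["        if name_lower.startswith(known_model) and len(known_model) > best_length:"]) ++ ["            best_match = limit"]) ++ ["            best_length = len(known_model)"]) ++ [""]) ++ ["    return best_match"]) ++ [""]) = X ++ pvFooterLines := by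
  simp [pvFooterLines]

theorem pvSorted2NilIff (xs : List (String × Int)) :
    PySem.List.sorted2 xs Prod.fst Prod.snd = [] ↔ xs = [] := by
  constructor
  · intro h
    have hp := PySem.List.sorted2_perm xs Prod.fst Prod.snd false
    rw [h] at hp
    exact hp.symm.eq_nil
  · intro h; subst h; rfl

theorem pvBlocksNeNil (gs : List (String × List (String × Int))) :
    ∀ b ∈ pvBlocks gs, b ≠ [] := by
  intro b hb
  rcases List.mem_filterMap.mp hb with ⟨pg, _, hf⟩
  by_cases h : pg.2 = []
  · simp [h] at hf
  · simp only [if_neg h, Option.some_inj] at hf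
    rw [← hf]
    simp [pvBlockLines]

theorem pvFlatLast (b : List String) (bs : List (List String)) :
    ((b :: bs).flatMap (· ++ [""])).getLast? = some "" := by
  induction bs generalizing b with
  | nil => simp [List.flatMap_cons]
  | cons b2 bs ih =>
    have h2 : ((b2 :: bs).flatMap (· ++ [""])) ≠ [] := by
      simp [List.flatMap_cons]
    rw [show ((b :: b2 :: bs).flatMap (· ++ [""])) = (b ++ [""]) ++ ((b2 :: bs).flatMap (· ++ [""])) by
        simp [List.flatMap_cons]]
    rw [List.getLast?_append_of_ne_nil _ h2]
    exact ih b2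

theorem pvFlatSplit (b : List String) (bs : List (List String)) :
    (b :: bs).flatMap (· ++ [""]) = ((b :: bs).flatMap (· ++ [""])).dropLast ++ [""] := by
  have hne : (b :: bs).flatMap (· ++ [""]) ≠ [] := by simp [List.flatMap_cons]
  have h1 := List.dropLast_append_getLast hne
  have h2 : ((b :: bs).flatMap (· ++ [""])).getLast hne = "" := by
    have := pvFlatLast b bs
    rwa [List.getLast?_eq_some_getLast hne, Option.some_inj] at this
  rw [h2] at h1
  exact h1.symm

theorem pvGenA (models : List (String × Int)) :
    generate_module models
      = PySem.Str.join "\n" ((pvHeaderLines ++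
          ((pvBlocks (pvKey8.map (fun k => (k, (PySem.List.sorted2 (PySem.Dict.ofList models).items Prod.fst Prod.snd).filter (fun p => pvClassify p.1 == k))))).flatMap (· ++ [""])).dropLast) ++ pvFooterLines) := by
  unfold generate_module
  simp only []
  rw [PySem.List.foldl_congr_mem _ _ (fun d p => d.modify (pvClassify p.1) [] (· ++ [p])) _
      (fun acc x _ => pvStepA_eq acc x)]
  rw [show (PySem.Dict.ofList [("OpenAI", ([] : List (String × Int))), ("Anthropic", []), ("DeepSeek", []), ("Mistral", []), ("Gemini", []), ("Qwen", []), ("Llama", []), ("Other", [])]) = pvProviders0 from rfl]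
  rw [pvItems_final]
  rw [PySem.List.foldl_congr_mem _ _ pvStepL _ (by
      intro acc pm _
      simp only [PySem.List.foldl_append_singleton_eq_map]
      rfl)]
  rw [pvFoldBody, pvDeltaBlocks]
  rcases hbs : (pvBlocks (pvKey8.map (fun k => (k, (PySem.List.sorted2 (PySem.Dict.ofList models).items Prod.fst Prod.snd).filter (fun p => pvClassify p.1 == k))))) with _ | ⟨b, bs'⟩
  · simp only [List.flatMap_nil, List.append_nil, List.dropLast_nil]
    rw [if_neg (by decide), pvFooterAppends]
  · obtain ⟨D, hD⟩ : ∃ D, (b :: bs').flatMap (· ++ [""]) = D ++ [""] :=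
      ⟨((b :: bs').flatMap (· ++ [""])).dropLast, pvFlatSplit b bs'⟩
    rw [hD, ← List.append_assoc, PySem.List.pyGet?_neg_one_append_singleton, if_pos rfl,
        PySem.List.pop?_last]
    simp only [List.dropLast_concat]
    rw [pvFooterAppends]

theorem pvGenB (models : List (String × Int)) :
    generate_module_alt models
      = pvHeaderStr ++ (if (pvBlocks (pvKey8.map (fun k => (k, (PySem.List.sorted2 (PySem.Dict.ofList models).items Prod.fst Prod.snd).filter (fun p => pvClassify p.1 == k))))).map (PySem.Str.join "\n") = [] then ""
          else "\n" ++ PySem.Str.join "\n\n" ((pvBlocks (pvKey8.map (fun k => (k, (PySem.List.sorted2 (PySem.Dict.ofList models).items Prod.fst Prod.snd).filter (fun p => pvClassify p.1 == k))))).map (PySem.Str.join "\n"))) ++ "\n" ++ pvFooterStr := by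
  unfold generate_module_alt
  simp only []
  rw [show pvRules.map Prod.fst ++ ["Other"] = pvKey8 from rfl]
  have hblocks : pvKey8.filterMap (fun provider =>
      if PySem.List.sorted2 ((PySem.List.sorted2 (PySem.Dict.ofList models).items Prod.fst Prod.snd).filter
            (fun mc => pvClassify mc.1 == provider)) Prod.fst Prod.snd = [] then none
      else some (PySem.Str.join "\n" (("    # " ++ provider ++ " models") ::
        (PySem.List.sorted2 ((PySem.List.sorted2 (PySem.Dict.ofList models).items Prod.fst Prod.snd).filter
            (fun mc => pvClassify mc.1 == provider)) Prod.fst Prod.snd).map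
          (fun mc => "    \"" ++ mc.1 ++ "\": " ++ PySem.Int.toStr mc.2 ++ ","))))
      = (pvBlocks (pvKey8.map (fun k => (k, (PySem.List.sorted2 (PySem.Dict.ofList models).items Prod.fst Prod.snd).filter (fun p => pvClassify p.1 == k))))).map (PySem.Str.join "\n") := by
    unfold pvBlocks
    rw [List.filterMap_map, List.map_filterMap]
    apply List.filterMap_congr
    intro k _
    by_cases hk : ((PySem.List.sorted2 (PySem.Dict.ofList models).items Prod.fst Prod.snd).filter
        (fun mc => pvClassify mc.1 == k)) = []
    · simp [hk]
      rfl
    · rw [if_neg (by rw [pvSorted2NilIff]; exact hk)]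
      simp only [Function.comp, pvBlockLines, pvHdr, if_neg hk, Option.map_some]
      rfl
  rw [hblocks]

-- ===== VERDICT (by name: the statement is the Claim_ definition above) =====
theorem generate_module_spec : Claim_equal_generate_module := by
  intro models _
  unfold Spec_generate_module
  rw [pvGenA, pvGenB]
  exact pvEmit _ (pvBlocksNeNil _)
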